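-- pv_equiv track=rewrite | github.com/cpt-r3tr0/hakerrank-mathematics | Number Theory/HelpMike.py | solve
-- ===== SOURCE A (Python) =====
-- def solve(n, k):
--     a=[0]*k
--     a[0]=n//k
--     for i in range(1,n%k+1):
--         a[i]=a[0]+1
--     for i in range(n%k+1,k):
--         a[i]=a[0]
--
--     count=0
--     count= (a[0]*(a[0]-1))//2
--     loop=k//2
--     if k%2!=0:
--         loop=(k//2)+1
--     for i in range(1,loop):
--         count+=a[i]*a[k-i]
--     if(k%2==0):
--         count+=(a[k//2]*(a[k//2]-1))//2
--     return(count)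
-- ===== SOURCE B (Python) =====
-- def solve(n, k):
--     # O(1) closed form: count pairs by how many indices fall in each constant-value range
--     q, r = divmod(n, k)
--     m = (k - 1) // 2              # number of (i, k-i) pairs with 1 <= i < k-i
--     cx = min(m, r)                # i in [1,m] with a[i] == q+1
--     cy = max(0, m - (k - r) + 1)  # i in [1,m] with a[k-i] == q+1
--     cxy = max(0, min(m, r) - (k - r) + 1)
--     total = q * (q - 1) // 2 + m * q * q + q * (cx + cy) + cxy
--     if k % 2 == 0:
--         t = q + 1 if k // 2 <= r else q
--         total += t * (t - 1) // 2
--     return total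
-- ===== Notes on version B (the rewrite author's own statement) =====
-- stated objective: faster
-- what changed: B replaces A's O(k) bucket array construction and O(k) pair loop by an O(1) closed form that counts with min/max arithmetic how many loop indices fall in each constant-value range of the bucket array.
import Mathlib
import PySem

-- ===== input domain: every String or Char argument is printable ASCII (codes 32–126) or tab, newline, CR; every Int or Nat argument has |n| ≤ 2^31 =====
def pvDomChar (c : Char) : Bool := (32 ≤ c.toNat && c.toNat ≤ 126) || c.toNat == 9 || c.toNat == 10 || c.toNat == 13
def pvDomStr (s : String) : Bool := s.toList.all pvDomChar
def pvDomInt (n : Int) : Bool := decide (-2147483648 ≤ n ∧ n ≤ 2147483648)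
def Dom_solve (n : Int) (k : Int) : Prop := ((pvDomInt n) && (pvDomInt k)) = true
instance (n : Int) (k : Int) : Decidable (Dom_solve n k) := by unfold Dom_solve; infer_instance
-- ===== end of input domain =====

-- B replaces A's O(k) bucket array and pair loop by an O(1) closed form counting
-- how many loop indices fall in each constant-value range of the bucket array.

-- ===== PORT A =====
def solve (n : Int) (k : Int) : Int :=
  let a0 : List Int := List.replicate k.toNat 0
  let a1 := PySem.List.pySetD a0 0 (PySem.Int.floordiv n k)
  let a2 := (PySem.List.pyRange 1 (PySem.Int.mod n k + 1) 1).foldl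
      (fun a i => PySem.List.pySetD a i (PySem.List.pyGetD a 0 0 + 1)) a1
  let a := (PySem.List.pyRange (PySem.Int.mod n k + 1) k 1).foldl
      (fun a i => PySem.List.pySetD a i (PySem.List.pyGetD a 0 0)) a2
  let count0 := PySem.Int.floordiv (PySem.List.pyGetD a 0 0 * (PySem.List.pyGetD a 0 0 - 1)) 2
  let loop := if PySem.Int.mod k 2 ≠ 0 then PySem.Int.floordiv k 2 + 1 else PySem.Int.floordiv k 2
  let count := (PySem.List.pyRange 1 loop 1).foldl
      (fun c i => c + PySem.List.pyGetD a i 0 * PySem.List.pyGetD a (k - i) 0) count0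
  if PySem.Int.mod k 2 = 0 then
    count + PySem.Int.floordiv
      (PySem.List.pyGetD a (PySem.Int.floordiv k 2) 0 *
        (PySem.List.pyGetD a (PySem.Int.floordiv k 2) 0 - 1)) 2
  else count

-- ===== PORT B =====
def solve_alt (n : Int) (k : Int) : Int :=
  let q := PySem.Int.floordiv n k
  let r := PySem.Int.mod n k
  let m := PySem.Int.floordiv (k - 1) 2
  let cx := min m r
  let cy := max 0 (m - (k - r) + 1)
  let cxy := max 0 (min m r - (k - r) + 1)
  let total := PySem.Int.floordiv (q * (q - 1)) 2 + m * q * q + q * (cx + cy) + cxy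
  if PySem.Int.mod k 2 = 0 then
    let t := if PySem.Int.floordiv k 2 ≤ r then q + 1 else q
    total + PySem.Int.floordiv (t * (t - 1)) 2
  else total

-- ===== PRECONDITION & SPEC =====
-- Pre_: Python A raises on k ≤ 0 (ZeroDivisionError at n//k for k = 0, IndexError on the
-- empty list [0]*k for k < 0), so exactly those inputs are excluded.
def Pre_solve (n : Int) (k : Int) : Prop := 1 ≤ k
instance (n : Int) (k : Int) : Decidable (Pre_solve n k) := by unfold Pre_solve; infer_instance
def pvWitness_solve : Int × Int := (17, 5)
def Spec_solve (n : Int) (k : Int) (out : Int) : Prop := out = solve_alt n k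
instance (n : Int) (k : Int) (out : Int) : Decidable (Spec_solve n k out) := by unfold Spec_solve; infer_instance

-- ===== CLAIM (what is proved, stated in full; the proofs are below) =====
def Claim_equal_solve : Prop := ∀ (n : Int) (k : Int), Dom_solve n k → Pre_solve n k → Spec_solve n k (solve n k)

-- ===== LEMMAS AND PROOFS =====

-- helpers used only by the proofs
theorem getD_oob (xs : List Int) (j : Int) (h : (xs.length : Int) ≤ j) :
    PySem.List.pyGetD xs j 0 = 0 := by
  have h1 : ¬ (j < (xs.length:Int)) := by omega
  have h2 : 0 ≤ j := by omega
  simp [PySem.List.pyGetD, PySem.List.pyGet?, PySem.List.pyIdx?, h1, h2]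

theorem getD_in (xs : List Int) (j : Int) (h0 : 0 ≤ j) (h : j < (xs.length : Int)) :
    PySem.List.pyGetD xs j 0 = xs[j.toNat]'(by omega) :=
  PySem.List.pyGetD_eq_getElem xs 0 h0 (by omega)

theorem fill_spec (g : Int → Int) : ∀ (t : Nat) (lo : Int) (xs : List Int), 0 < lo →
    lo + t ≤ (xs.length : Int) →
    ((PySem.List.pyRange lo (lo + t) 1).foldl
        (fun a i => PySem.List.pySetD a i (g (PySem.List.pyGetD a 0 0))) xs).length = xs.length ∧
    ∀ j : Int, 0 ≤ j →
      PySem.List.pyGetD ((PySem.List.pyRange lo (lo + t) 1).foldl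
          (fun a i => PySem.List.pySetD a i (g (PySem.List.pyGetD a 0 0))) xs) j 0
        = if lo ≤ j ∧ j < lo + t then g (PySem.List.pyGetD xs 0 0) else PySem.List.pyGetD xs j 0 := by
  intro t
  induction t with
  | zero =>
    intro lo xs hlo hlen
    rw [PySem.List.pyRange_one_eq_nil (by omega)]
    constructor
    · rfl
    · intro j hj
      rw [List.foldl_nil, if_neg (by push_cast; omega)]
  | succ t ih =>
    intro lo xs hlo hlen
    have hsp : PySem.List.pyRange lo (lo + (t+1:Nat)) 1
        = PySem.List.pyRange lo (lo + t) 1 ++ [lo + t] := by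
      have : (lo + (t+1:Nat)) = (lo + (t:Int)) + 1 := by push_cast; ring
      rw [this, PySem.List.pyRange_one_succ_right (by omega)]
    obtain ⟨ihl, ihg⟩ := ih lo xs hlo (by push_cast at hlen ⊢; omega)
    set ys := (PySem.List.pyRange lo (lo + t) 1).foldl
        (fun a i => PySem.List.pySetD a i (g (PySem.List.pyGetD a 0 0))) xs with hys
    have hy0 : PySem.List.pyGetD ys 0 0 = PySem.List.pyGetD xs 0 0 := by
      rw [ihg 0 le_rfl]; simp; omega
    rw [hsp, List.foldl_append]
    simp only [List.foldl_cons, List.foldl_nil, ← hys]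
    rw [hy0, PySem.List.pySetD_of_nonneg ys _ (by omega : (0:Int) ≤ lo + t)]
    constructor
    · rw [List.length_set, ihl]
    · intro j hj
      by_cases hjl : j < (xs.length : Int)
      · rw [getD_in _ _ hj (by rw [List.length_set, ihl]; exact_mod_cast hjl)]
        rw [List.getElem_set]
        by_cases hje : j = lo + t
        · subst hje
          rw [if_pos rfl, if_pos (by push_cast; omega)]
        · have hne : ¬ ((lo + (t:Int)).toNat = j.toNat) := by omega
          rw [if_neg hne, ← getD_in ys j hj (by rw [ihl]; exact_mod_cast hjl), ihg j hj]
          by_cases hc : lo ≤ j ∧ j < lo + (t:Int)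
          · rw [if_pos hc, if_pos (by push_cast; omega)]
          · rw [if_neg hc, if_neg (by push_cast; omega)]
      · rw [getD_oob _ _ (by rw [List.length_set, ihl]; omega),
            getD_oob xs j (by omega)]
        rw [if_neg (by push_cast at hlen ⊢; omega)]

def arrA (n k : Int) : List Int :=
  (PySem.List.pyRange (PySem.Int.mod n k + 1) k 1).foldl
      (fun a i => PySem.List.pySetD a i (PySem.List.pyGetD a 0 0))
      ((PySem.List.pyRange 1 (PySem.Int.mod n k + 1) 1).foldl
        (fun a i => PySem.List.pySetD a i (PySem.List.pyGetD a 0 0 + 1))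
        (PySem.List.pySetD (List.replicate k.toNat (0:Int)) 0 (PySem.Int.floordiv n k)))

theorem arrA_getD (n k : Int) (hk : 1 ≤ k) (j : Int) (h0 : 0 ≤ j) (hjk : j < k) :
    PySem.List.pyGetD (arrA n k) j 0
      = PySem.Int.floordiv n k + (if 1 ≤ j ∧ j ≤ PySem.Int.mod n k then 1 else 0) := by
  have hr0 : 0 ≤ PySem.Int.mod n k := PySem.Int.mod_nonneg n (by omega)
  have hrk : PySem.Int.mod n k < k := PySem.Int.mod_lt n (by omega)
  have hbl : ((PySem.List.pySetD (List.replicate k.toNat (0:Int)) 0 (PySem.Int.floordiv n k)).length : Int) = k := by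
    rw [PySem.List.pySetD_of_nonneg _ _ le_rfl]; simp; omega
  have hbset : PySem.List.pySetD (List.replicate k.toNat (0:Int)) 0 (PySem.Int.floordiv n k)
      = (List.replicate k.toNat (0:Int)).set 0 (PySem.Int.floordiv n k) := by
    rw [PySem.List.pySetD_of_nonneg _ _ le_rfl]; rfl
  have hb0 : PySem.List.pyGetD (PySem.List.pySetD (List.replicate k.toNat (0:Int)) 0 (PySem.Int.floordiv n k)) 0 0
      = PySem.Int.floordiv n k := by
    rw [hbset, getD_in _ _ le_rfl (by simp; omega)]
    simp
  have hbj : ∀ j : Int, 1 ≤ j → j < k →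
      PySem.List.pyGetD (PySem.List.pySetD (List.replicate k.toNat (0:Int)) 0 (PySem.Int.floordiv n k)) j 0 = 0 := by
    intro j hj1 hjk
    rw [hbset, getD_in _ _ (by omega) (by simp; omega), List.getElem_set]
    rw [if_neg (by omega), List.getElem_replicate]
  have h1 := fill_spec (fun x => x + 1) (PySem.Int.mod n k).toNat 1
      (PySem.List.pySetD (List.replicate k.toNat (0:Int)) 0 (PySem.Int.floordiv n k))
      (by omega) (by omega)
  simp only [] at h1
  have he1 : PySem.Int.mod n k + 1 = 1 + ((PySem.Int.mod n k).toNat : Int) := by omega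
  unfold arrA
  rw [he1]
  have h2 := fill_spec (fun x => x) (k - PySem.Int.mod n k - 1).toNat
      (1 + ((PySem.Int.mod n k).toNat : Int))
      ((PySem.List.pyRange 1 (1 + ((PySem.Int.mod n k).toNat : Int)) 1).foldl
        (fun a i => PySem.List.pySetD a i (PySem.List.pyGetD a 0 0 + 1))
        (PySem.List.pySetD (List.replicate k.toNat (0:Int)) 0 (PySem.Int.floordiv n k)))
      (by omega) (by rw [h1.1]; omega)
  simp only [] at h2
  have he2 : (1 + ((PySem.Int.mod n k).toNat : Int)) + ((k - PySem.Int.mod n k - 1).toNat : Int) = k := by omega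
  rw [he2] at h2
  rw [h2.2 j h0]
  have ha20 : PySem.List.pyGetD
      ((PySem.List.pyRange 1 (1 + ((PySem.Int.mod n k).toNat : Int)) 1).foldl
        (fun a i => PySem.List.pySetD a i (PySem.List.pyGetD a 0 0 + 1))
        (PySem.List.pySetD (List.replicate k.toNat (0:Int)) 0 (PySem.Int.floordiv n k))) 0 0
      = PySem.Int.floordiv n k := by
    rw [h1.2 0 le_rfl, if_neg (by omega), hb0]
  by_cases hc2 : (1 + ((PySem.Int.mod n k).toNat : Int) ≤ j ∧ j < k)
  · rw [if_pos hc2, ha20, if_neg (by omega)]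
    simp
  · rw [if_neg hc2, h1.2 j h0]
    by_cases hc1 : (1 ≤ j ∧ j < 1 + ((PySem.Int.mod n k).toNat : Int))
    · rw [if_pos hc1, hb0, if_pos (by omega)]
    · rw [if_neg hc1]
      by_cases hj0 : j = 0
      · subst hj0
        rw [hb0, if_neg (by omega)]
        simp
      · exfalso; omega

theorem sum_spec (n k : Int) (hk : 1 ≤ k) (c0 : Int) : ∀ (m : Nat), (m : Int) ≤ k - 1 →
    (PySem.List.pyRange 1 (1 + (m : Int)) 1).foldl
      (fun c i => c + PySem.List.pyGetD (arrA n k) i 0 * PySem.List.pyGetD (arrA n k) (k - i) 0) c0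
    = c0 + (m : Int) * PySem.Int.floordiv n k * PySem.Int.floordiv n k
        + PySem.Int.floordiv n k *
            (min (m : Int) (PySem.Int.mod n k) + max 0 ((m : Int) - (k - PySem.Int.mod n k) + 1))
        + max 0 (min (m : Int) (PySem.Int.mod n k) - (k - PySem.Int.mod n k) + 1) := by
  have hr0 : 0 ≤ PySem.Int.mod n k := PySem.Int.mod_nonneg n (by omega)
  have hrk : PySem.Int.mod n k < k := PySem.Int.mod_lt n (by omega)
  intro m
  induction m with
  | zero =>
    intro hm
    rw [PySem.List.pyRange_one_eq_nil (by omega)]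
    simp only [List.foldl_nil, Nat.cast_zero]
    have e1 : min (0:Int) (PySem.Int.mod n k) = 0 := by omega
    have e2 : max (0:Int) (0 - (k - PySem.Int.mod n k) + 1) = 0 := by omega
    rw [e1, e2]
    ring
  | succ m ih =>
    intro hm
    push_cast at hm ⊢
    rw [show (1:Int) + ((m:Int) + 1) = (1 + (m:Int)) + 1 from by ring,
        PySem.List.pyRange_one_succ_right (by omega), List.foldl_append]
    simp only [List.foldl_cons, List.foldl_nil]
    rw [ih (by omega)]
    rw [arrA_getD n k hk (1 + (m:Int)) (by omega) (by omega),
        arrA_getD n k hk (k - (1 + (m:Int))) (by omega) (by omega)]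
    by_cases hx : (1:Int) ≤ 1 + (m:Int) ∧ 1 + (m:Int) ≤ PySem.Int.mod n k
    · rw [if_pos hx]
      by_cases hy : (1:Int) ≤ k - (1 + (m:Int)) ∧ k - (1 + (m:Int)) ≤ PySem.Int.mod n k
      · rw [if_pos hy]
        have e1 : min ((m:Int) + 1) (PySem.Int.mod n k) = min (m:Int) (PySem.Int.mod n k) + 1 := by omega
        have e2 : max 0 ((m:Int) + 1 - (k - PySem.Int.mod n k) + 1)
            = max 0 ((m:Int) - (k - PySem.Int.mod n k) + 1) + 1 := by omega
        have e3 : max 0 (min ((m:Int) + 1) (PySem.Int.mod n k) - (k - PySem.Int.mod n k) + 1)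
            = max 0 (min (m:Int) (PySem.Int.mod n k) - (k - PySem.Int.mod n k) + 1) + 1 := by omega
        rw [e3, e1, e2]
        ring
      · rw [if_neg hy]
        have e1 : min ((m:Int) + 1) (PySem.Int.mod n k) = min (m:Int) (PySem.Int.mod n k) + 1 := by omega
        have e2 : max 0 ((m:Int) + 1 - (k - PySem.Int.mod n k) + 1)
            = max 0 ((m:Int) - (k - PySem.Int.mod n k) + 1) := by omega
        have e3 : max 0 (min ((m:Int) + 1) (PySem.Int.mod n k) - (k - PySem.Int.mod n k) + 1)
            = max 0 (min (m:Int) (PySem.Int.mod n k) - (k - PySem.Int.mod n k) + 1) := by omega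
        rw [e3, e1, e2]
        ring
    · rw [if_neg hx]
      by_cases hy : (1:Int) ≤ k - (1 + (m:Int)) ∧ k - (1 + (m:Int)) ≤ PySem.Int.mod n k
      · rw [if_pos hy]
        have e1 : min ((m:Int) + 1) (PySem.Int.mod n k) = min (m:Int) (PySem.Int.mod n k) := by omega
        have e2 : max 0 ((m:Int) + 1 - (k - PySem.Int.mod n k) + 1)
            = max 0 ((m:Int) - (k - PySem.Int.mod n k) + 1) + 1 := by omega
        have e3 : max 0 (min ((m:Int) + 1) (PySem.Int.mod n k) - (k - PySem.Int.mod n k) + 1)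
            = max 0 (min (m:Int) (PySem.Int.mod n k) - (k - PySem.Int.mod n k) + 1) := by omega
        rw [e3, e1, e2]
        ring
      · rw [if_neg hy]
        have e1 : min ((m:Int) + 1) (PySem.Int.mod n k) = min (m:Int) (PySem.Int.mod n k) := by omega
        have e2 : max 0 ((m:Int) + 1 - (k - PySem.Int.mod n k) + 1)
            = max 0 ((m:Int) - (k - PySem.Int.mod n k) + 1) := by omega
        have e3 : max 0 (min ((m:Int) + 1) (PySem.Int.mod n k) - (k - PySem.Int.mod n k) + 1)
            = max 0 (min (m:Int) (PySem.Int.mod n k) - (k - PySem.Int.mod n k) + 1) := by omega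
        rw [e3, e1, e2]
        ring

theorem solve_eq_body (n k : Int) : solve n k =
    ((PySem.List.pyRange 1 (if PySem.Int.mod k 2 ≠ 0 then PySem.Int.floordiv k 2 + 1 else PySem.Int.floordiv k 2) 1).foldl
        (fun c i => c + PySem.List.pyGetD (arrA n k) i 0 * PySem.List.pyGetD (arrA n k) (k - i) 0)
        (PySem.Int.floordiv (PySem.List.pyGetD (arrA n k) 0 0 * (PySem.List.pyGetD (arrA n k) 0 0 - 1)) 2))
    + (if PySem.Int.mod k 2 = 0 then
        PySem.Int.floordiv (PySem.List.pyGetD (arrA n k) (PySem.Int.floordiv k 2) 0 *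
          (PySem.List.pyGetD (arrA n k) (PySem.Int.floordiv k 2) 0 - 1)) 2
      else 0) := by
  unfold solve arrA
  by_cases he : PySem.Int.mod k 2 = 0
  · rw [if_pos he, if_pos he]
  · rw [if_neg he, if_neg he]
    ring

theorem main (n k : Int) (hk : 1 ≤ k) : solve n k = solve_alt n k := by
  have hr0 : 0 ≤ PySem.Int.mod n k := PySem.Int.mod_nonneg n (by omega)
  have hrk : PySem.Int.mod n k < k := PySem.Int.mod_lt n (by omega)
  have hq2 : PySem.Int.floordiv k 2 = k / 2 := PySem.Int.floordiv_eq_ediv_of_pos (by omega)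
  have hm2 : PySem.Int.mod k 2 = k % 2 := PySem.Int.mod_eq_emod_of_pos (by omega)
  have hmd : PySem.Int.floordiv (k - 1) 2 = (k - 1) / 2 := PySem.Int.floordiv_eq_ediv_of_pos (by omega)
  have hM : ((PySem.Int.floordiv (k - 1) 2).toNat : Int) = PySem.Int.floordiv (k - 1) 2 := by
    rw [hmd]; omega
  have hg0 : PySem.List.pyGetD (arrA n k) 0 0 = PySem.Int.floordiv n k := by
    rw [arrA_getD n k hk 0 le_rfl (by omega), if_neg (by omega)]
    ring
  have hMk : ((PySem.Int.floordiv (k - 1) 2).toNat : Int) ≤ k - 1 := by rw [hM, hmd]; omega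
  rw [solve_eq_body]
  simp only [solve_alt]
  by_cases he : PySem.Int.mod k 2 = 0
  · have he' : k % 2 = 0 := by rwa [hm2] at he
    have hk2 : 2 ≤ k := by omega
    rw [if_pos he, if_pos he, if_neg (by simpa using he)]
    have hloop : PySem.Int.floordiv k 2 = 1 + ((PySem.Int.floordiv (k - 1) 2).toNat : Int) := by
      rw [hq2, hM, hmd]; omega
    rw [hloop, sum_spec n k hk _ _ hMk]
    have hgm : PySem.List.pyGetD (arrA n k) (1 + ((PySem.Int.floordiv (k - 1) 2).toNat : Int)) 0
        = (if 1 + ((PySem.Int.floordiv (k - 1) 2).toNat : Int) ≤ PySem.Int.mod n k then PySem.Int.floordiv n k + 1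
           else PySem.Int.floordiv n k) := by
      rw [arrA_getD n k hk _ (by omega) (by rw [hM, hmd]; omega)]
      by_cases hc : 1 + ((PySem.Int.floordiv (k - 1) 2).toNat : Int) ≤ PySem.Int.mod n k
      · rw [if_pos hc, if_pos ⟨by omega, hc⟩]
      · rw [if_neg hc, if_neg (fun h => hc h.2), add_zero]
    rw [hgm, hg0, hM]
  · rw [if_neg he, if_neg he, if_pos (by simpa using he), add_zero]
    have he' : k % 2 = 1 := by have := Int.emod_two_eq k; rw [hm2] at he; omega
    have hloop : PySem.Int.floordiv k 2 + 1 = 1 + ((PySem.Int.floordiv (k - 1) 2).toNat : Int) := by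
      rw [hq2, hM, hmd]; omega
    rw [hloop, sum_spec n k hk _ _ hMk, hg0, hM]

-- ===== VERDICT (by name: the statement is the Claim_ definition above) =====
theorem solve_spec : Claim_equal_solve := by
  intro n k _ hp
  exact main n k hp
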